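-- pv_equiv track=rewrite | github.com/fkulic/advent-of-code | 2025/day11.py | part_one
-- ===== SOURCE A (Python) =====
-- from collections import deque
--
-- def part_one(server_connections, start_node) -> int:
--     if start_node not in server_connections:
--         return 0
--
--     paths = 0
--     stack = deque([start_node])
--     while stack:
--         for o in server_connections.get(stack.popleft(), []):
--             if o == "out":
--                 paths += 1
--             else:
--                 stack.append(o)
--     return paths
-- ===== SOURCE B (Python) =====
-- def part_one(server_connections, start_node) -> int:
--     if start_node not in server_connections:
--         return 0
--
--     # Bottom-up rounds DP (Bellman-Ford style): after r rounds counts[k] is the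
--     # number of paths from k to "out" of length <= r; on an acyclic graph
--     # len(server_connections) + 1 rounds reach the fixpoint, i.e. the full count.
--     counts = {}
--     for _ in range(len(server_connections) + 1):
--         counts = {
--             k: sum(1 if o == "out" else counts.get(o, 0) for o in outs)
--             for k, outs in server_connections.items()
--         }
--     return counts[start_node]
-- ===== Notes on version B (the rewrite author's own statement) =====
-- stated objective: alternative
-- what changed: A counts paths by enumerating every individual path with a BFS queue; B instead runs a Bellman-Ford-style rounds dynamic program that recomputes per-key path counts len(d)+1 times, reaching the fixpoint on every input where A terminates.
import Mathlib
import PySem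

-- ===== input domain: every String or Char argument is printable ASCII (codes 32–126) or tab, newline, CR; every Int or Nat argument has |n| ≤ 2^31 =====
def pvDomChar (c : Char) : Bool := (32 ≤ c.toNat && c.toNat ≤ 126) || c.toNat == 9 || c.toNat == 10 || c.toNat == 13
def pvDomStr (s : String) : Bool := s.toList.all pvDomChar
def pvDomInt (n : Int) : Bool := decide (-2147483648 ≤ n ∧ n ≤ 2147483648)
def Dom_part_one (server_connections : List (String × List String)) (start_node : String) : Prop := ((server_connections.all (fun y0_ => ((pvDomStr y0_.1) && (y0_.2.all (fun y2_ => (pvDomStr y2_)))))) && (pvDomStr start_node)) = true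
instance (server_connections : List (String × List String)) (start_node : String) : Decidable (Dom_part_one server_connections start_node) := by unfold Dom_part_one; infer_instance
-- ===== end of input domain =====

-- B counts the paths with a rounds (Bellman-Ford style) dynamic program over the
-- keys instead of A's breadth-first enumeration of every individual path; equality
-- is proved on all inputs where A terminates (Pre_part_one).

-- ===== PORT A =====
-- dict lookup `d.get(n, [])`: first match in the association list (a Python dict has unique keys)
def pvGetList (d : List (String × List String)) (n : String) : List String :=
  match d with
  | [] => []
  | (k, v) :: rest => if k = n then v else pvGetList rest n

-- `n in d` (dict key membership)
def pvHasKey (d : List (String × List String)) (n : String) : Bool :=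
  d.any (fun p => p.1 == n)

-- total number of edges; (pvEdges d + 2) ^ d.length bounds the number of queue pops
-- on inputs satisfying Pre_part_one (proved below), so the fuel only makes the loop total
def pvEdges (d : List (String × List String)) : Nat := (d.map (fun p => p.2.length)).sum

-- body of `for o in server_connections.get(..., [])`
def partOneStep (acc : Int × List String) (o : String) : Int × List String :=
  if o = "out" then (acc.1 + 1, acc.2) else (acc.1, acc.2 ++ [o])

-- `while stack:` — pop from the front (deque.popleft), append to the back
def partOneLoop (d : List (String × List String)) : Nat → List String → Int → Int
  | 0, _, paths => paths
  | _ + 1, [], paths => paths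
  | f + 1, n :: rest, paths =>
      let r := (pvGetList d n).foldl partOneStep (paths, rest)
      partOneLoop d f r.2 r.1

def part_one (server_connections : List (String × List String)) (start_node : String) : Int :=
  if pvHasKey server_connections start_node = false then 0
  else partOneLoop server_connections
        ((pvEdges server_connections + 2) ^ server_connections.length)
        [start_node] 0

-- ===== PORT B =====
-- `counts.get(o, 0)`: first match in the association list
def pvGetIntD (c : List (String × Int)) (n : String) : Int :=
  match c with
  | [] => 0
  | (k, v) :: rest => if k = n then v else pvGetIntD rest n

-- one dict comprehension `{k: sum(1 if o == "out" else counts.get(o, 0) for o in outs) for k, outs in ...}`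
def roundCounts (d : List (String × List String)) (prev : List (String × Int)) : List (String × Int) :=
  d.map (fun p => (p.1, (p.2.map (fun o => if o = "out" then (1 : Int) else pvGetIntD prev o)).sum))

def part_one_alt (server_connections : List (String × List String)) (start_node : String) : Int :=
  if pvHasKey server_connections start_node = false then 0
  else
    -- `counts[start_node]` cannot raise: after the guard start_node is a key of every round's dict
    pvGetIntD ((List.range (server_connections.length + 1)).foldl
                 (fun c _ => roundCounts server_connections c) [])
      start_node

-- ===== PRECONDITION & SPEC =====
-- the successor lists of the graph, read with the standard library lookup
def pvSuccsOf (d : List (String × List String)) (n : String) : List String :=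
  (List.lookup n d).getD []

-- okDepth d i n: every forward chain from n dead-ends or reaches "out" within i edges
def okDepth (d : List (String × List String)) : Nat → String → Bool
  | 0, n => (pvSuccsOf d n).all (fun o => o == "out")
  | i + 1, n => (pvSuccsOf d n).all (fun o => o == "out" || okDepth d i o)

-- Pre_ excludes exactly the inputs on which A never returns: a cycle reachable from
-- start_node, i.e. some forward chain from start_node longer than the number of keys.
def Pre_part_one (server_connections : List (String × List String)) (start_node : String) : Prop :=
  okDepth server_connections server_connections.length start_node = true
instance (server_connections : List (String × List String)) (start_node : String) : Decidable (Pre_part_one server_connections start_node) := by unfold Pre_part_one; infer_instance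

def pvWitness_part_one : (List (String × List String)) × String :=
  ([("a", ["b", "out"]), ("b", ["out"])], "a")

def Spec_part_one (server_connections : List (String × List String)) (start_node : String) (out : Int) : Prop := out = part_one_alt server_connections start_node
instance (server_connections : List (String × List String)) (start_node : String) (out : Int) : Decidable (Spec_part_one server_connections start_node out) := by unfold Spec_part_one; infer_instance

-- ===== CLAIM (what is proved, stated in full; the proofs are below) =====
def Claim_equal_part_one : Prop := ∀ (server_connections : List (String × List String)) (start_node : String), Dom_part_one server_connections start_node → Pre_part_one server_connections start_node → Spec_part_one server_connections start_node (part_one server_connections start_node)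

-- ===== LEMMAS AND PROOFS =====

-- the mathematical object both programs compute: number of paths to "out" of length ≤ fuel
def cntN (d : List (String × List String)) : Nat → String → Int
  | 0, _ => 0
  | f + 1, n => ((pvGetList d n).map (fun o => if o = "out" then (1 : Int) else cntN d f o)).sum

def Cval (d : List (String × List String)) (n : String) : Int := cntN d (d.length + 1) n

lemma pvSuccsOf_eq (d : List (String × List String)) (n : String) :
    pvSuccsOf d n = pvGetList d n := by
  induction d with
  | nil => simp [pvSuccsOf, pvGetList, List.lookup]
  | cons p rest ih =>
      obtain ⟨k, v⟩ := p
      by_cases hk : k = n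
      · subst hk; simp [pvSuccsOf, pvGetList, List.lookup]
      · simp only [pvSuccsOf, pvGetList, List.lookup] at ih ⊢
        rw [if_neg hk, show (n == k) = false from beq_eq_false_iff_ne.mpr (Ne.symm hk)]
        exact ih

lemma okDepth_mono (d : List (String × List String)) :
    ∀ i n, okDepth d i n = true → okDepth d (i + 1) n = true := by
  intro i
  induction i with
  | zero =>
      intro n h
      simp only [okDepth, List.all_eq_true, Bool.or_eq_true] at h ⊢
      intro o ho; exact Or.inl (h o ho)
  | succ i ih =>
      intro n h
      rw [show okDepth d (i + 1 + 1) n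
            = (pvSuccsOf d n).all (fun o => o == "out" || okDepth d (i + 1) o) from rfl]
      rw [show okDepth d (i + 1) n
            = (pvSuccsOf d n).all (fun o => o == "out" || okDepth d i o) from rfl] at h
      simp only [List.all_eq_true, Bool.or_eq_true] at h ⊢
      intro o ho
      rcases h o ho with h' | h'
      · exact Or.inl h'
      · exact Or.inr (ih o h')

lemma okDepth_le (d : List (String × List String)) {i j : Nat} (hij : i ≤ j) :
    ∀ n, okDepth d i n = true → okDepth d j n = true := by
  induction j with
  | zero =>
      intro n h
      have : i = 0 := by omega
      subst this; exact h
  | succ j ih =>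
      intro n h
      rcases Nat.lt_or_ge i (j + 1) with hlt | hge
      · exact okDepth_mono d j n (ih (by omega) n h)
      · have : i = j + 1 := by omega
        subst this; exact h
  
lemma cntN_stab (d : List (String × List String)) :
    ∀ i n, okDepth d i n = true → ∀ f g, i + 1 ≤ f → i + 1 ≤ g → cntN d f n = cntN d g n := by
  intro i
  induction i with
  | zero =>
      intro n h f g hf hg
      obtain ⟨f', rfl⟩ : ∃ f', f = f' + 1 := ⟨f - 1, by omega⟩
      obtain ⟨g', rfl⟩ : ∃ g', g = g' + 1 := ⟨g - 1, by omega⟩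
      simp only [okDepth, pvSuccsOf_eq, List.all_eq_true] at h
      simp only [cntN]
      congr 1
      apply List.map_congr_left
      intro o ho
      have : o = "out" := by simpa using h o ho
      simp [this]
  | succ i ih =>
      intro n h f g hf hg
      obtain ⟨f', rfl⟩ : ∃ f', f = f' + 1 := ⟨f - 1, by omega⟩
      obtain ⟨g', rfl⟩ : ∃ g', g = g' + 1 := ⟨g - 1, by omega⟩
      simp only [okDepth, pvSuccsOf_eq, List.all_eq_true] at h
      simp only [cntN]
      congr 1
      apply List.map_congr_left
      intro o ho
      by_cases hout : o = "out"
      · simp [hout]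
      · have h' := h o ho
        simp [hout] at h'
        simp only [if_neg hout]
        exact ih o h' f' g' (by omega) (by omega)

-- one unfolding of Cval (fuel has stabilised below the top)
lemma Cval_step (d : List (String × List String)) (n : String)
    (h : okDepth d d.length n = true) :
    Cval d n = ((pvGetList d n).map (fun o => if o = "out" then (1 : Int) else Cval d o)).sum := by
  unfold Cval
  conv_lhs => rw [cntN]
  refine congrArg List.sum (List.map_congr_left ?_)
  intro o ho
  by_cases hout : o = "out"
  · simp [hout]
  · simp only [if_neg hout]
    cases hV : d.length with
    | zero =>
        rw [hV] at h
        simp only [okDepth, pvSuccsOf_eq, List.all_eq_true] at h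
        exact absurd (by simpa using h o ho) hout
    | succ i =>
        rw [hV] at h
        simp only [okDepth, pvSuccsOf_eq, List.all_eq_true, Bool.or_eq_true] at h
        have h' : okDepth d i o = true := by
          rcases h o ho with h' | h'
          · exact absurd (by simpa using h') hout
          · exact h'
        exact cntN_stab d i o h' (i + 1) (i + 1 + 1) (by omega) (by omega)

-- number of "out" entries, as the loop counts them
def outCnt : List String → Int
  | [] => 0
  | o :: l => (if o = "out" then 1 else 0) + outCnt l

lemma foldl_partOneStep (l : List String) :
    ∀ (p : Int) (st : List String),
      l.foldl partOneStep (p, st)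
        = (p + outCnt l, st ++ l.filter (fun o => !(o == "out"))) := by
  induction l with
  | nil => intro p st; simp [outCnt]
  | cons o l ih =>
      intro p st
      by_cases hout : o = "out"
      · simp [partOneStep, hout, ih, outCnt]; ring
      · simp [partOneStep, hout, ih, outCnt, List.append_assoc]

lemma sum_split (l : List String) (g : String → Int) :
    ((l.map (fun o => if o = "out" then (1 : Int) else g o)).sum)
      = outCnt l + (((l.filter (fun o => !(o == "out"))).map g).sum) := by
  induction l with
  | nil => simp [outCnt]
  | cons o l ih =>
      by_cases hout : o = "out"
      · simp [hout, outCnt, ih]; ring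
      · simp [hout, outCnt, ih]; ring

lemma pvGetList_length_le (d : List (String × List String)) (n : String) :
    (pvGetList d n).length ≤ pvEdges d := by
  induction d with
  | nil => simp [pvGetList, pvEdges]
  | cons p rest ih =>
      obtain ⟨k, v⟩ := p
      simp only [pvGetList, pvEdges, List.map_cons, List.sum_cons]
      by_cases hk : k = n
      · simp [hk]
      · simp only [if_neg hk]
        have := ih
        simp only [pvEdges] at this
        omega

-- the queue invariant: with enough fuel, processing a stack adds Σ Cval of its members
lemma loop_eq (d : List (String × List String)) :
    ∀ (f : Nat) (ann : List (String × Nat)) (paths : Int),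
      (∀ p ∈ ann, okDepth d p.2 p.1 = true ∧ p.2 ≤ d.length) →
      ((ann.map (fun p => (pvEdges d + 2) ^ p.2)).sum ≤ f) →
      partOneLoop d f (ann.map Prod.fst) paths
        = paths + (ann.map (fun p => Cval d p.1)).sum := by
  intro f
  induction f with
  | zero =>
      intro ann paths hok hfuel
      cases ann with
      | nil => simp [partOneLoop]
      | cons q ann' =>
          exfalso
          have h1 : 1 ≤ (pvEdges d + 2) ^ q.2 := Nat.one_le_pow _ _ (by omega)
          simp only [List.map_cons, List.sum_cons] at hfuel
          omega
  | succ f ih =>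
      intro ann paths hok hfuel
      cases ann with
      | nil => simp [partOneLoop]
      | cons q ann' =>
          obtain ⟨n, i⟩ := q
          have hq := hok (n, i) (by simp)
          simp only [List.map_cons, List.sum_cons] at hfuel ⊢
          simp only [partOneLoop, foldl_partOneStep]
          set S := pvGetList d n with hS
          cases i with
          | zero =>
              -- okDepth 0: every successor is "out", nothing is pushed
              have hall : S.all (fun o => o == "out") = true := by
                rw [hS, ← pvSuccsOf_eq]; exact hq.1
              have hfilt : S.filter (fun o => !(o == "out")) = [] := by
                rw [List.filter_eq_nil_iff]
                intro o ho
                simp only [List.all_eq_true] at hall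
                simpa using hall o ho
              rw [hfilt, List.append_nil]
              rw [ih ann' (paths + outCnt S)
                    (fun p hp => hok p (List.mem_cons_of_mem _ hp))
                    (by simp only [pow_zero] at hfuel; omega)]
              have hC : Cval d n = outCnt S := by
                rw [Cval_step d n (okDepth_le d (Nat.zero_le _) n hq.1)]
                rw [← hS, sum_split S (fun o => Cval d o), hfilt]
                simp
              rw [hC]; ring
          | succ i' =>
              -- okDepth (i'+1): pushed successors all satisfy okDepth i'
              have hall : S.all (fun o => o == "out" || okDepth d i' o) = true := by
                rw [hS, ← pvSuccsOf_eq]; exact hq.1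
              set filt := S.filter (fun o => !(o == "out")) with hfilt
              have hmem : ∀ o ∈ filt, o ≠ "out" ∧ okDepth d i' o = true := by
                intro o ho
                rw [hfilt, List.mem_filter] at ho
                have h1 : o ≠ "out" := by simpa using ho.2
                simp only [List.all_eq_true] at hall
                have h2 := hall o ho.1
                simp [h1] at h2
                exact ⟨h1, h2⟩
              -- annotate the new stack
              have hstack : (ann'.map Prod.fst) ++ filt
                  = ((ann' ++ filt.map (fun o => (o, i'))).map Prod.fst) := by
                simp [List.map_map, Function.comp_def]
              rw [hstack]
              have hx : 1 ≤ (pvEdges d + 2) ^ i' := Nat.one_le_pow _ _ (by omega)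
              have hlen : filt.length ≤ pvEdges d := by
                have h1 : filt.length ≤ S.length := by rw [hfilt]; exact List.length_filter_le _ _
                have h2 := pvGetList_length_le d n
                rw [← hS] at h2; omega
              have hfuel' : ((ann' ++ filt.map (fun o => (o, i'))).map
                    (fun p => (pvEdges d + 2) ^ p.2)).sum ≤ f := by
                simp only [List.map_append, List.sum_append, List.map_map, Function.comp_def]
                have hps : ((filt.map (fun o => ((pvEdges d + 2) ^ i'))).sum)
                    = filt.length * (pvEdges d + 2) ^ i' := by
                  rw [List.map_const', List.sum_replicate, smul_eq_mul]
                have hmul : filt.length * (pvEdges d + 2) ^ i' ≤ pvEdges d * (pvEdges d + 2) ^ i' :=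
                  Nat.mul_le_mul_right _ hlen
                have hpow : (pvEdges d + 2) ^ (i' + 1)
                    = pvEdges d * (pvEdges d + 2) ^ i' + 2 * (pvEdges d + 2) ^ i' := by ring
                rw [hps]
                omega
              rw [ih (ann' ++ filt.map (fun o => (o, i'))) (paths + outCnt S)
                    (by
                      intro p hp
                      rcases List.mem_append.mp hp with h | h
                      · exact hok p (List.mem_cons_of_mem _ h)
                      · rcases List.mem_map.mp h with ⟨o, ho, rfl⟩
                        refine ⟨(hmem o ho).2, by omega⟩)
                    hfuel']
              have hC : Cval d n = outCnt S + ((filt.map (fun o => Cval d o)).sum) := by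
                rw [Cval_step d n (okDepth_le d hq.2 n hq.1)]
                rw [← hS, sum_split S (fun o => Cval d o), ← hfilt]
              simp only [List.map_append, List.sum_append, List.map_map, Function.comp_def]
              rw [hC]; ring

-- B's rounds compute cntN
lemma roundCounts_get (d : List (String × List String)) (prev : List (String × Int)) (n : String) :
    pvGetIntD (roundCounts d prev) n
      = ((pvGetList d n).map (fun o => if o = "out" then (1 : Int) else pvGetIntD prev o)).sum := by
  induction d with
  | nil => simp [roundCounts, pvGetIntD, pvGetList]
  | cons p rest ih =>
      obtain ⟨k, v⟩ := p
      simp only [roundCounts, List.map_cons, pvGetIntD, pvGetList]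
      by_cases hk : k = n
      · simp [hk]
      · simp only [if_neg hk]
        exact ih

lemma iter_get (d : List (String × List String)) :
    ∀ (r : Nat) (n : String),
      pvGetIntD ((List.range r).foldl (fun c _ => roundCounts d c) []) n = cntN d r n := by
  intro r
  induction r with
  | zero => intro n; simp [pvGetIntD, cntN]
  | succ r ih =>
      intro n
      rw [List.range_succ, List.foldl_append]
      simp only [List.foldl_cons, List.foldl_nil]
      rw [roundCounts_get]
      simp only [cntN]
      congr 1
      apply List.map_congr_left
      intro o ho
      by_cases hout : o = "out"
      · simp [hout]
      · simp [hout, ih o]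

-- ===== VERDICT (by name: the statement is the Claim_ definition above) =====
theorem part_one_spec : Claim_equal_part_one := by
  intro d start _hdom hpre
  unfold Spec_part_one part_one part_one_alt
  cases hkey : pvHasKey d start with
  | false => simp
  | true =>
      rw [if_neg (by simp : ¬(true = false)), if_neg (by simp : ¬(true = false))]
      rw [iter_get d (d.length + 1) start]
      have := loop_eq d ((pvEdges d + 2) ^ d.length) [(start, d.length)] 0
        (by intro p hp; simp at hp; subst hp; exact ⟨hpre, le_refl _⟩)
        (by simp)
      simp only [List.map_cons, List.map_nil, List.sum_cons, List.sum_nil] at this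
      rw [this]
      unfold Cval
      ring
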